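-- pv_equiv track=rewrite | github.com/MelodyEars/Test-Tasks | task 1/main.py | create_list_with_digraph
-- ===== SOURCE A (Python) =====
-- def create_list_with_digraph(msg):
-- 	"""
-- 	 Create a list of digraphs from a given message.
-- 	 Args:
-- 	     msg (str): The input message.
-- 	 Returns:
-- 	     list: A list of digraphs extracted from the message.
-- 	 """
--
-- 	msg_list = []  # Initialize an empty list to store the digraphs
-- 	step_count = 3  # Number of characters to step forward in each iteration
-- 	num = 3  # Initial value of the number of characters to extract
-- 	step_msg = msg[:num]  # Extract the first `num` characters from the message
--
-- 	while step_msg: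
-- 		msg_list.append(step_msg[0:2])  # Extract the first two characters and add them to the list
-- 		if len(step_msg) == 3:
-- 			msg_list.append(step_msg[2])  # If there is a third character, add it to the list
--
-- 		resent_num = num  # Store the current value of `num` for future reference
-- 		num += step_count  # Increment `num` by `step_count`
-- 		step_msg = msg[resent_num:num]  # Extract the next `num` characters from the message
--
-- 	return msg_list  # Return the list of digraphs
-- ===== SOURCE B (Python) =====
-- def create_list_with_digraph(msg):
--     """Cut msg into pieces of alternating lengths 2,1,2,1,... (single pass, one index)."""
--     pieces = []
--     i = 0
--     take = 2
--     while i < len(msg):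
--         pieces.append(msg[i:i + take])
--         i += take
--         take = 3 - take
--     return pieces
-- ===== Notes on version B (the rewrite author's own statement) =====
-- stated objective: simpler
-- what changed: Replaces A's chunk-of-3 bookkeeping (num/step_count/resent_num, a 3-char window sliced per iteration plus a len==3 branch) with a single index and a take length that alternates 2,1,2,1,..., appending one slice per iteration.
import Mathlib
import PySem

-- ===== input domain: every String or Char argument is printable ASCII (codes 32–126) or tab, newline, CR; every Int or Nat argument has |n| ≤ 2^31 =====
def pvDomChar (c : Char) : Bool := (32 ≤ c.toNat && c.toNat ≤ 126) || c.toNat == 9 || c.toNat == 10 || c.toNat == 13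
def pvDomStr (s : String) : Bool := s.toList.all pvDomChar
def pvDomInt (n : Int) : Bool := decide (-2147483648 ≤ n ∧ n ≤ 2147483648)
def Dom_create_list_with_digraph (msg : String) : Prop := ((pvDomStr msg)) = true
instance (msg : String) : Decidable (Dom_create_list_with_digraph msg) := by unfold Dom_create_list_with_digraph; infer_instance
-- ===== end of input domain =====

-- B replaces A's chunk-of-3/len==3 bookkeeping by a single index with an alternating
-- take length 2,1,2,1,… (objective: simpler; same output on every string).

-- ===== PORT A =====
-- literal port of A's while loop; fuel only makes the recursion total (one unit per
-- iteration suffices since num grows by 3 each round).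
def pvALoop (msg : List Char) (fuel : Nat) (stepCount num : Int)
    (stepMsg : List Char) (acc : List String) : List String :=
  match fuel with
  | 0 => acc
  | f + 1 =>
    if stepMsg = [] then acc
    else
      let acc1 := acc ++ [String.ofList (PySem.List.slice stepMsg (some 0) (some 2))]
      let acc2 :=
        if stepMsg.length = 3 then
          match PySem.List.pyGet? stepMsg 2 with
          | some c => acc1 ++ [String.ofList [c]]
          | none => acc1          -- unreachable: length = 3
        else acc1
      let resentNum := num
      let num' := num + stepCount
      pvALoop msg f stepCount num' (PySem.List.slice msg (some resentNum) (some num')) acc2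

def create_list_with_digraph (msg : String) : List String :=
  let l := msg.toList
  pvALoop l (l.length + 1) 3 3 (PySem.List.slice l none (some 3)) []

-- ===== PORT B =====
-- literal port of Source B's while loop (index i, alternating take); fuel for totality.
def pvBLoop (msg : List Char) (fuel : Nat) (i take : Int) (acc : List String) : List String :=
  match fuel with
  | 0 => acc
  | f + 1 =>
    if i < (msg.length : Int) then
      pvBLoop msg f (i + take) (3 - take)
        (acc ++ [String.ofList (PySem.List.slice msg (some i) (some (i + take)))])
    else acc

def create_list_with_digraph_alt (msg : String) : List String :=
  let l := msg.toList
  pvBLoop l (l.length + 1) 0 2 []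

-- ===== PRECONDITION & SPEC =====
def Spec_create_list_with_digraph (msg : String) (out : List String) : Prop := out = create_list_with_digraph_alt msg
instance (msg : String) (out : List String) : Decidable (Spec_create_list_with_digraph msg out) := by unfold Spec_create_list_with_digraph; infer_instance

-- ===== CLAIM (what is proved, stated in full; the proofs are below) =====
def Claim_equal_create_list_with_digraph : Prop := ∀ (msg : String), Dom_create_list_with_digraph msg → Spec_create_list_with_digraph msg (create_list_with_digraph msg)

-- ===== LEMMAS AND PROOFS =====

-- slice l [m : m+k] = take k of drop m, with the bounds as Nat casts
theorem pv_slice_take (l : List Char) (m k : Nat) :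
    PySem.List.slice l (some (m : Int)) (some ((m : Int) + (k : Int))) = (l.drop m).take k :=
  PySem.List.slice_natCast_add l m k

-- B's loop returns its accumulator as soon as the index is past the end
theorem pvBLoop_stop (l : List Char) (g : Nat) (i t : Int) (acc : List String)
    (h : ¬ i < (l.length : Int)) : pvBLoop l g i t acc = acc := by
  cases g <;> simp [pvBLoop, h]

-- the two loops agree from any common position m, given enough fuel on both sides
theorem pv_key (l : List Char) : ∀ (f : Nat), ∀ (m g : Nat) (acc : List String),
    l.length - m < f → l.length - m < g →
    pvALoop l f 3 ((m : Int) + 3) ((l.drop m).take 3) acc =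
      pvBLoop l g (m : Int) 2 acc := by
  intro f
  induction f with
  | zero => intro m g acc hf hg; omega
  | succ fA ih =>
    intro m g acc hf hg
    obtain ⟨gB, rfl⟩ : ∃ gB, g = gB + 1 := ⟨g - 1, by omega⟩
    by_cases hm : l.length ≤ m
    · -- suffix empty: both loops stop immediately
      have hd : l.drop m = [] := List.drop_eq_nil_of_le hm
      have hmB : ¬ ((m : Int) < (l.length : Int)) := by exact_mod_cast not_lt.mpr hm
      simp [pvALoop, pvBLoop, hd, hmB]
    · rw [not_le] at hm
      have hmB : (m : Int) < (l.length : Int) := by exact_mod_cast hm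
      have hd : l.drop m ≠ [] := by simp [List.drop_eq_nil_iff]; omega
      have hne : (l.drop m).take 3 ≠ [] := by simp [List.take_eq_nil_iff, hd]
      have hlen : ((l.drop m).take 3).length = min 3 (l.length - m) := by simp
      have hp1 : PySem.List.slice ((l.drop m).take 3) (some 0) (some 2)
          = (l.drop m).take 2 := by
        have := pv_slice_take ((l.drop m).take 3) 0 2
        simpa [List.take_take] using this
      have hpB1 : PySem.List.slice l (some (m : Int)) (some ((m : Int) + 2))
          = (l.drop m).take 2 := pv_slice_take l m 2
      by_cases h2 : l.length ≤ m + 2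
      · -- 1 or 2 chars left: one piece on each side, then both loops stop
        obtain ⟨fA', rfl⟩ : ∃ fA', fA = fA' + 1 := ⟨fA - 1, by omega⟩
        have hlen3 : ((l.drop m).take 3).length ≠ 3 := by omega
        have hdrop3 : l.drop (m + 3) = [] := List.drop_eq_nil_of_le (by omega)
        have hnextA : PySem.List.slice l (some ((m : Int) + 3)) (some ((m : Int) + 3 + 3))
            = [] := by
          have h := pv_slice_take l (m + 3) 3
          push_cast at h
          rw [show ((m : Int) + 3 + 3) = ((m : Int) + 3 + 3) from rfl] at h ⊢
          rw [h, hdrop3, List.take_nil]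
        have hmB2 : ¬ (((m : Int) + 2) < (l.length : Int)) := by
          have : (l.length : Int) ≤ (m : Int) + 2 := by exact_mod_cast h2
          omega
        have h3 : ¬ (3 ≤ l.length - m) := by omega
        simp [pvALoop, pvBLoop, hne, hmB, hnextA, hp1, hpB1, h3,
          pvBLoop_stop l gB _ _ _ hmB2]
      · -- at least 3 chars left: A emits 2-piece + 3rd char, B two iterations; recurse
        rw [not_le] at h2
        obtain ⟨gB', rfl⟩ : ∃ gB', gB = gB' + 1 := ⟨gB - 1, by omega⟩
        have hlen3 : ((l.drop m).take 3).length = 3 := by omega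
        have hget : PySem.List.pyGet? ((l.drop m).take 3) 2 = some l[m + 2] := by
          rw [show (2 : Int) = ((2 : Nat) : Int) by norm_num,
              PySem.List.pyGet?_natCast]
          rw [List.getElem?_take_of_lt (by omega), List.getElem?_drop]
          exact List.getElem?_eq_getElem (by omega)
        have hpB2 : PySem.List.slice l (some ((m : Int) + 2)) (some ((m : Int) + 2 + 1))
            = [l[m + 2]] := by
          have h := pv_slice_take l (m + 2) 1
          push_cast at h
          rw [h, List.take_one, List.head?_drop]
          simp [List.getElem?_eq_getElem (by omega : m + 2 < l.length)]
        have hnextA : PySem.List.slice l (some ((m : Int) + 3)) (some ((m : Int) + 3 + 3))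
            = (l.drop (m + 3)).take 3 := by
          have h := pv_slice_take l (m + 3) 3
          push_cast at h
          exact h
        have hmB2 : ((m : Int) + 2) < (l.length : Int) := by
          have : ((m : Nat) : Int) + 2 < ((l.length : Nat) : Int) := by exact_mod_cast h2
          exact this
        have ihm := ih (m + 3) gB'
          (acc ++ [String.ofList ((l.drop m).take 2)] ++ [String.ofList [l[m + 2]]])
          (by omega) (by omega)
        have h3 : (3 ≤ l.length - m) := by omega
        simp only [pvALoop, pvBLoop, if_neg hne, hlen3, if_pos hmB, if_pos hmB2,
          hget, hnextA, hp1, hpB1, if_true]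
        norm_num
        rw [hpB2, show ((m : Int) + 2 + 1) = (m : Int) + 3 by ring]
        push_cast at ihm
        simpa using ihm

theorem create_list_with_digraph_main : ∀ (msg : String),
    create_list_with_digraph msg = create_list_with_digraph_alt msg := by
  intro msg
  unfold create_list_with_digraph create_list_with_digraph_alt
  have h0 : PySem.List.slice msg.toList none (some 3) = (msg.toList.drop 0).take 3 := by
    rw [PySem.List.slice_to _ (by norm_num)]; simp
  have := pv_key msg.toList (msg.toList.length + 1) 0 (msg.toList.length + 1) []
    (by omega) (by omega)
  simpa [h0] using this

-- ===== VERDICT (by name: the statement is the Claim_ definition above) =====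
theorem create_list_with_digraph_spec : Claim_equal_create_list_with_digraph := by
  intro msg _
  exact create_list_with_digraph_main msg
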